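-- pv_equiv track=rewrite | github.com/V-Aymeric/Generateur_procedural | world_generation.py | generate_grammary
-- ===== SOURCE A (Python) =====
-- grammary_dict = {
--     "A": "ABAAABB",
--     "B": "ABBAB",
--     "C": "B",
--     "D": "BBA",
--     "E": "BA",
--     "F": "ABA",
--     "G": "BBAB",
--     "H": "AABA",
--     "I": "BABA",
--     "J": "AA",
--     "K": "BB",
--     "L": "BAAB",
--     "M": "ABBA",
--     "N": "BAB",
--     "O": "AAB",
--     "P": "AAA",
--     "Q": "BBB",
--     "R": "BBAA",
--     "S": "ABAA",
--     "T": "A",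
--     "U": "BAB",
--     "V": "AAB",
--     "W": "B",
--     "X": "AA",
--     "Y": "BB",
--     "Z": "BABAB"
-- }
--
-- def generate_grammary(arg_str):
--     tmp_str = ""
--     for i in range(3):
--         for c in arg_str:
--             tmp_str += grammary_dict[c]
--         arg_str = tmp_str
--         tmp_str = ""
--
--     return arg_str
-- ===== SOURCE B (Python) =====
-- # Single-pass expansion via a precomputed depth-3 table (literals below were
-- # obtained once by applying the grammar three times to each single letter).
-- _FULL3 = {
--     'A': 'ABAAABBABBABABAAABBABAAABBABAAABBABBABABBABABAAABBABBABABBABABAAABBABBABABAAABBABBABABAAABBABAAABBABAAABBABBABABBABABAAABBABBABABAAABBABAAABBABAAABBABBABABBABABAAABBABBABABAAABBABAAABBABAAABBABBABABBABABAAABBABBABABBABABAAABBABBABABAAABBABBABABBABABAAABBABBAB',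
--     'B': 'ABAAABBABBABABAAABBABAAABBABAAABBABBABABBABABAAABBABBABABBABABAAABBABBABABAAABBABBABABBABABAAABBABBABABAAABBABBABABAAABBABAAABBABAAABBABBABABBABABAAABBABBABABBABABAAABBABBAB',
--     'C': 'ABAAABBABBABABBABABAAABBABBAB',
--     'D': 'ABAAABBABBABABBABABAAABBABBABABAAABBABBABABBABABAAABBABBABABAAABBABBABABAAABBABAAABBABAAABBABBABABBAB',
--     'E': 'ABAAABBABBABABBABABAAABBABBABABAAABBABBABABAAABBABAAABBABAAABBABBABABBAB',
--     'F': 'ABAAABBABBABABAAABBABAAABBABAAABBABBABABBABABAAABBABBABABBABABAAABBABBABABAAABBABBABABAAABBABAAABBABAAABBABBABABBAB',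
--     'G': 'ABAAABBABBABABBABABAAABBABBABABAAABBABBABABBABABAAABBABBABABAAABBABBABABAAABBABAAABBABAAABBABBABABBABABAAABBABBABABBABABAAABBABBAB',
--     'H': 'ABAAABBABBABABAAABBABAAABBABAAABBABBABABBABABAAABBABBABABAAABBABAAABBABAAABBABBABABBABABAAABBABBABABBABABAAABBABBABABAAABBABBABABAAABBABAAABBABAAABBABBABABBAB',
--     'I': 'ABAAABBABBABABBABABAAABBABBABABAAABBABBABABAAABBABAAABBABAAABBABBABABBABABAAABBABBABABBABABAAABBABBABABAAABBABBABABAAABBABAAABBABAAABBABBABABBAB',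
--     'J': 'ABAAABBABBABABAAABBABAAABBABAAABBABBABABBABABAAABBABBABABAAABBABAAABBABAAABBABBABABBAB',
--     'K': 'ABAAABBABBABABBABABAAABBABBABABAAABBABBABABBABABAAABBABBAB',
--     'L': 'ABAAABBABBABABBABABAAABBABBABABAAABBABBABABAAABBABAAABBABAAABBABBABABBABABAAABBABBABABAAABBABAAABBABAAABBABBABABBABABAAABBABBABABBABABAAABBABBAB',
--     'M': 'ABAAABBABBABABAAABBABAAABBABAAABBABBABABBABABAAABBABBABABBABABAAABBABBABABAAABBABBABABBABABAAABBABBABABAAABBABBABABAAABBABAAABBABAAABBABBABABBAB',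
--     'N': 'ABAAABBABBABABBABABAAABBABBABABAAABBABBABABAAABBABAAABBABAAABBABBABABBABABAAABBABBABABBABABAAABBABBAB',
--     'O': 'ABAAABBABBABABAAABBABAAABBABAAABBABBABABBABABAAABBABBABABAAABBABAAABBABAAABBABBABABBABABAAABBABBABABBABABAAABBABBAB',
--     'P': 'ABAAABBABBABABAAABBABAAABBABAAABBABBABABBABABAAABBABBABABAAABBABAAABBABAAABBABBABABBABABAAABBABBABABAAABBABAAABBABAAABBABBABABBAB',
--     'Q': 'ABAAABBABBABABBABABAAABBABBABABAAABBABBABABBABABAAABBABBABABAAABBABBABABBABABAAABBABBAB',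
--     'R': 'ABAAABBABBABABBABABAAABBABBABABAAABBABBABABBABABAAABBABBABABAAABBABBABABAAABBABAAABBABAAABBABBABABBABABAAABBABBABABAAABBABAAABBABAAABBABBABABBAB',
--     'S': 'ABAAABBABBABABAAABBABAAABBABAAABBABBABABBABABAAABBABBABABBABABAAABBABBABABAAABBABBABABAAABBABAAABBABAAABBABBABABBABABAAABBABBABABAAABBABAAABBABAAABBABBABABBAB',
--     'T': 'ABAAABBABBABABAAABBABAAABBABAAABBABBABABBAB',
--     'U': 'ABAAABBABBABABBABABAAABBABBABABAAABBABBABABAAABBABAAABBABAAABBABBABABBABABAAABBABBABABBABABAAABBABBAB',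
--     'V': 'ABAAABBABBABABAAABBABAAABBABAAABBABBABABBABABAAABBABBABABAAABBABAAABBABAAABBABBABABBABABAAABBABBABABBABABAAABBABBAB',
--     'W': 'ABAAABBABBABABBABABAAABBABBAB',
--     'X': 'ABAAABBABBABABAAABBABAAABBABAAABBABBABABBABABAAABBABBABABAAABBABAAABBABAAABBABBABABBAB',
--     'Y': 'ABAAABBABBABABBABABAAABBABBABABAAABBABBABABBABABAAABBABBAB',
--     'Z': 'ABAAABBABBABABBABABAAABBABBABABAAABBABBABABAAABBABAAABBABAAABBABBABABBABABAAABBABBABABBABABAAABBABBABABAAABBABBABABAAABBABAAABBABAAABBABBABABBABABAAABBABBABABBABABAAABBABBAB',}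
--
-- def generate_grammary(arg_str):
--     return "".join(_FULL3[c] for c in arg_str)
-- ===== Notes on version B (the rewrite author's own statement) =====
-- stated objective: alternative
-- what changed: A runs three successive rewrite passes over a geometrically growing intermediate string; B looks each input letter up in a precomputed table of depth-3 expansions and emits the result in one left-to-right pass.
import Mathlib
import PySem

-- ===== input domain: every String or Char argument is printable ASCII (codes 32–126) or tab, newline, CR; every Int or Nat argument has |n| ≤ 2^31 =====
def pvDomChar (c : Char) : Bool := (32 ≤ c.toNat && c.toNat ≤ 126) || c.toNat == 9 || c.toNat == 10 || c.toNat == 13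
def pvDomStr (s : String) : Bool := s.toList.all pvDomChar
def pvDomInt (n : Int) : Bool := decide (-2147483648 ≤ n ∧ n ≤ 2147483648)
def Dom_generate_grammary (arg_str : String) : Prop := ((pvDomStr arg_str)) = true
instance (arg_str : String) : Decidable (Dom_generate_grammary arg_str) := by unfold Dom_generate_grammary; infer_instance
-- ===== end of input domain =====

-- B replaces A's three rewrite passes over a growing string by a single pass through a
-- precomputed table of depth-3 expansions (alternative decomposition; return value only).

-- ===== PORT A =====
-- the module constant grammary_dict as a lookup on its (single-char) keys; a key outside
-- 'A'..'Z' raises KeyError in Python (excluded by Pre_), here it contributes [].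
def gram (c : Char) : List Char :=
  if c = 'A' then ['A','B','A','A','A','B','B']
  else if c = 'B' then ['A','B','B','A','B']
  else if c = 'C' then ['B']
  else if c = 'D' then ['B','B','A']
  else if c = 'E' then ['B','A']
  else if c = 'F' then ['A','B','A']
  else if c = 'G' then ['B','B','A','B']
  else if c = 'H' then ['A','A','B','A']
  else if c = 'I' then ['B','A','B','A']
  else if c = 'J' then ['A','A']
  else if c = 'K' then ['B','B']
  else if c = 'L' then ['B','A','A','B']
  else if c = 'M' then ['A','B','B','A']
  else if c = 'N' then ['B','A','B']
  else if c = 'O' then ['A','A','B']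
  else if c = 'P' then ['A','A','A']
  else if c = 'Q' then ['B','B','B']
  else if c = 'R' then ['B','B','A','A']
  else if c = 'S' then ['A','B','A','A']
  else if c = 'T' then ['A']
  else if c = 'U' then ['B','A','B']
  else if c = 'V' then ['A','A','B']
  else if c = 'W' then ['B']
  else if c = 'X' then ['A','A']
  else if c = 'Y' then ['B','B']
  else if c = 'Z' then ['B','A','B','A','B']
  else []

-- inner loop: tmp_str = ""; for c in arg_str: tmp_str += grammary_dict[c]
def gramPass (s : List Char) : List Char :=
  s.foldl (fun tmp c => tmp ++ gram c) []

-- for i in range(3): arg_str = one pass over arg_str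
def generate_grammary (arg_str : String) : String :=
  String.mk ((PySem.List.pyRange 0 3 1).foldl (fun s _ => gramPass s) arg_str.toList)

-- ===== PORT B =====
-- the module constant _FULL3: each letter's depth-3 expansion as a literal string
-- each entry kept as its character list, matching the port convention used for gram
def full3 (c : Char) : List Char :=
  if c = 'A' then ['A','B','A','A','A','B','B','A','B','B','A','B','A','B','A','A','A','B','B','A','B','A','A','A','B','B','A','B','A','A','A','B','B','A','B','B','A','B','A','B','B','A','B','A','B','A','A','A','B','B','A','B','B','A','B','A','B','B','A','B','A','B','A','A','A','B','B','A','B','B','A','B','A','B','A','A','A','B','B','A','B','B','A','B','A','B','A','A','A','B','B','A','B','A','A','A','B','B','A','B','A','A','A','B','B','A','B','B','A','B','A','B','B','A','B','A','B','A','A','A','B','B','A','B','B','A','B','A','B','A','A','A','B','B','A','B','A','A','A','B','B','A','B','A','A','A','B','B','A','B','B','A','B','A','B','B','A','B','A','B','A','A','A','B','B','A','B','B','A','B','A','B','A','A','A','B','B','A','B','A','A','A','B','B','A','B','A','A','A','B','B','A','B','B','A','B','A','B','B','A','B','A','B','A','A','A','B','B','A','B','B','A','B','A','B','B','A','B','A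','B','A','A','A','B','B','A','B','B','A','B','A','B','A','A','A','B','B','A','B','B','A','B','A','B','B','A','B','A','B','A','A','A','B','B','A','B','B','A','B']
  else if c = 'B' then ['A','B','A','A','A','B','B','A','B','B','A','B','A','B','A','A','A','B','B','A','B','A','A','A','B','B','A','B','A','A','A','B','B','A','B','B','A','B','A','B','B','A','B','A','B','A','A','A','B','B','A','B','B','A','B','A','B','B','A','B','A','B','A','A','A','B','B','A','B','B','A','B','A','B','A','A','A','B','B','A','B','B','A','B','A','B','B','A','B','A','B','A','A','A','B','B','A','B','B','A','B','A','B','A','A','A','B','B','A','B','B','A','B','A','B','A','A','A','B','B','A','B','A','A','A','B','B','A','B','A','A','A','B','B','A','B','B','A','B','A','B','B','A','B','A','B','A','A','A','B','B','A','B','B','A','B','A','B','B','A','B','A','B','A','A','A','B','B','A','B','B','A','B']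
  else if c = 'C' then ['A','B','A','A','A','B','B','A','B','B','A','B','A','B','B','A','B','A','B','A','A','A','B','B','A','B','B','A','B']
  else if c = 'D' then ['A','B','A','A','A','B','B','A','B','B','A','B','A','B','B','A','B','A','B','A','A','A','B','B','A','B','B','A','B','A','B','A','A','A','B','B','A','B','B','A','B','A','B','B','A','B','A','B','A','A','A','B','B','A','B','B','A','B','A','B','A','A','A','B','B','A','B','B','A','B','A','B','A','A','A','B','B','A','B','A','A','A','B','B','A','B','A','A','A','B','B','A','B','B','A','B','A','B','B','A','B']
  else if c = 'E' then ['A','B','A','A','A','B','B','A','B','B','A','B','A','B','B','A','B','A','B','A','A','A','B','B','A','B','B','A','B','A','B','A','A','A','B','B','A','B','B','A','B','A','B','A','A','A','B','B','A','B','A','A','A','B','B','A','B','A','A','A','B','B','A','B','B','A','B','A','B','B','A','B']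
  else if c = 'F' then ['A','B','A','A','A','B','B','A','B','B','A','B','A','B','A','A','A','B','B','A','B','A','A','A','B','B','A','B','A','A','A','B','B','A','B','B','A','B','A','B','B','A','B','A','B','A','A','A','B','B','A','B','B','A','B','A','B','B','A','B','A','B','A','A','A','B','B','A','B','B','A','B','A','B','A','A','A','B','B','A','B','B','A','B','A','B','A','A','A','B','B','A','B','A','A','A','B','B','A','B','A','A','A','B','B','A','B','B','A','B','A','B','B','A','B']
  else if c = 'G' then ['A','B','A','A','A','B','B','A','B','B','A','B','A','B','B','A','B','A','B','A','A','A','B','B','A','B','B','A','B','A','B','A','A','A','B','B','A','B','B','A','B','A','B','B','A','B','A','B','A','A','A','B','B','A','B','B','A','B','A','B','A','A','A','B','B','A','B','B','A','B','A','B','A','A','A','B','B','A','B','A','A','A','B','B','A','B','A','A','A','B','B','A','B','B','A','B','A','B','B','A','B','A','B','A','A','A','B','B','A','B','B','A','B','A','B','B','A','B','A','B','A','A','A','B','B','A','B','B','A','B']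
  else if c = 'H' then ['A','B','A','A','A','B','B','A','B','B','A','B','A','B','A','A','A','B','B','A','B','A','A','A','B','B','A','B','A','A','A','B','B','A','B','B','A','B','A','B','B','A','B','A','B','A','A','A','B','B','A','B','B','A','B','A','B','A','A','A','B','B','A','B','A','A','A','B','B','A','B','A','A','A','B','B','A','B','B','A','B','A','B','B','A','B','A','B','A','A','A','B','B','A','B','B','A','B','A','B','B','A','B','A','B','A','A','A','B','B','A','B','B','A','B','A','B','A','A','A','B','B','A','B','B','A','B','A','B','A','A','A','B','B','A','B','A','A','A','B','B','A','B','A','A','A','B','B','A','B','B','A','B','A','B','B','A','B']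
  else if c = 'I' then ['A','B','A','A','A','B','B','A','B','B','A','B','A','B','B','A','B','A','B','A','A','A','B','B','A','B','B','A','B','A','B','A','A','A','B','B','A','B','B','A','B','A','B','A','A','A','B','B','A','B','A','A','A','B','B','A','B','A','A','A','B','B','A','B','B','A','B','A','B','B','A','B','A','B','A','A','A','B','B','A','B','B','A','B','A','B','B','A','B','A','B','A','A','A','B','B','A','B','B','A','B','A','B','A','A','A','B','B','A','B','B','A','B','A','B','A','A','A','B','B','A','B','A','A','A','B','B','A','B','A','A','A','B','B','A','B','B','A','B','A','B','B','A','B']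
  else if c = 'J' then ['A','B','A','A','A','B','B','A','B','B','A','B','A','B','A','A','A','B','B','A','B','A','A','A','B','B','A','B','A','A','A','B','B','A','B','B','A','B','A','B','B','A','B','A','B','A','A','A','B','B','A','B','B','A','B','A','B','A','A','A','B','B','A','B','A','A','A','B','B','A','B','A','A','A','B','B','A','B','B','A','B','A','B','B','A','B']
  else if c = 'K' then ['A','B','A','A','A','B','B','A','B','B','A','B','A','B','B','A','B','A','B','A','A','A','B','B','A','B','B','A','B','A','B','A','A','A','B','B','A','B','B','A','B','A','B','B','A','B','A','B','A','A','A','B','B','A','B','B','A','B']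
  else if c = 'L' then ['A','B','A','A','A','B','B','A','B','B','A','B','A','B','B','A','B','A','B','A','A','A','B','B','A','B','B','A','B','A','B','A','A','A','B','B','A','B','B','A','B','A','B','A','A','A','B','B','A','B','A','A','A','B','B','A','B','A','A','A','B','B','A','B','B','A','B','A','B','B','A','B','A','B','A','A','A','B','B','A','B','B','A','B','A','B','A','A','A','B','B','A','B','A','A','A','B','B','A','B','A','A','A','B','B','A','B','B','A','B','A','B','B','A','B','A','B','A','A','A','B','B','A','B','B','A','B','A','B','B','A','B','A','B','A','A','A','B','B','A','B','B','A','B']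
  else if c = 'M' then ['A','B','A','A','A','B','B','A','B','B','A','B','A','B','A','A','A','B','B','A','B','A','A','A','B','B','A','B','A','A','A','B','B','A','B','B','A','B','A','B','B','A','B','A','B','A','A','A','B','B','A','B','B','A','B','A','B','B','A','B','A','B','A','A','A','B','B','A','B','B','A','B','A','B','A','A','A','B','B','A','B','B','A','B','A','B','B','A','B','A','B','A','A','A','B','B','A','B','B','A','B','A','B','A','A','A','B','B','A','B','B','A','B','A','B','A','A','A','B','B','A','B','A','A','A','B','B','A','B','A','A','A','B','B','A','B','B','A','B','A','B','B','A','B']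
  else if c = 'N' then ['A','B','A','A','A','B','B','A','B','B','A','B','A','B','B','A','B','A','B','A','A','A','B','B','A','B','B','A','B','A','B','A','A','A','B','B','A','B','B','A','B','A','B','A','A','A','B','B','A','B','A','A','A','B','B','A','B','A','A','A','B','B','A','B','B','A','B','A','B','B','A','B','A','B','A','A','A','B','B','A','B','B','A','B','A','B','B','A','B','A','B','A','A','A','B','B','A','B','B','A','B']
  else if c = 'O' then ['A','B','A','A','A','B','B','A','B','B','A','B','A','B','A','A','A','B','B','A','B','A','A','A','B','B','A','B','A','A','A','B','B','A','B','B','A','B','A','B','B','A','B','A','B','A','A','A','B','B','A','B','B','A','B','A','B','A','A','A','B','B','A','B','A','A','A','B','B','A','B','A','A','A','B','B','A','B','B','A','B','A','B','B','A','B','A','B','A','A','A','B','B','A','B','B','A','B','A','B','B','A','B','A','B','A','A','A','B','B','A','B','B','A','B']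
  else if c = 'P' then ['A','B','A','A','A','B','B','A','B','B','A','B','A','B','A','A','A','B','B','A','B','A','A','A','B','B','A','B','A','A','A','B','B','A','B','B','A','B','A','B','B','A','B','A','B','A','A','A','B','B','A','B','B','A','B','A','B','A','A','A','B','B','A','B','A','A','A','B','B','A','B','A','A','A','B','B','A','B','B','A','B','A','B','B','A','B','A','B','A','A','A','B','B','A','B','B','A','B','A','B','A','A','A','B','B','A','B','A','A','A','B','B','A','B','A','A','A','B','B','A','B','B','A','B','A','B','B','A','B']
  else if c = 'Q' then ['A','B','A','A','A','B','B','A','B','B','A','B','A','B','B','A','B','A','B','A','A','A','B','B','A','B','B','A','B','A','B','A','A','A','B','B','A','B','B','A','B','A','B','B','A','B','A','B','A','A','A','B','B','A','B','B','A','B','A','B','A','A','A','B','B','A','B','B','A','B','A','B','B','A','B','A','B','A','A','A','B','B','A','B','B','A','B']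
  else if c = 'R' then ['A','B','A','A','A','B','B','A','B','B','A','B','A','B','B','A','B','A','B','A','A','A','B','B','A','B','B','A','B','A','B','A','A','A','B','B','A','B','B','A','B','A','B','B','A','B','A','B','A','A','A','B','B','A','B','B','A','B','A','B','A','A','A','B','B','A','B','B','A','B','A','B','A','A','A','B','B','A','B','A','A','A','B','B','A','B','A','A','A','B','B','A','B','B','A','B','A','B','B','A','B','A','B','A','A','A','B','B','A','B','B','A','B','A','B','A','A','A','B','B','A','B','A','A','A','B','B','A','B','A','A','A','B','B','A','B','B','A','B','A','B','B','A','B']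
  else if c = 'S' then ['A','B','A','A','A','B','B','A','B','B','A','B','A','B','A','A','A','B','B','A','B','A','A','A','B','B','A','B','A','A','A','B','B','A','B','B','A','B','A','B','B','A','B','A','B','A','A','A','B','B','A','B','B','A','B','A','B','B','A','B','A','B','A','A','A','B','B','A','B','B','A','B','A','B','A','A','A','B','B','A','B','B','A','B','A','B','A','A','A','B','B','A','B','A','A','A','B','B','A','B','A','A','A','B','B','A','B','B','A','B','A','B','B','A','B','A','B','A','A','A','B','B','A','B','B','A','B','A','B','A','A','A','B','B','A','B','A','A','A','B','B','A','B','A','A','A','B','B','A','B','B','A','B','A','B','B','A','B']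
  else if c = 'T' then ['A','B','A','A','A','B','B','A','B','B','A','B','A','B','A','A','A','B','B','A','B','A','A','A','B','B','A','B','A','A','A','B','B','A','B','B','A','B','A','B','B','A','B']
  else if c = 'U' then ['A','B','A','A','A','B','B','A','B','B','A','B','A','B','B','A','B','A','B','A','A','A','B','B','A','B','B','A','B','A','B','A','A','A','B','B','A','B','B','A','B','A','B','A','A','A','B','B','A','B','A','A','A','B','B','A','B','A','A','A','B','B','A','B','B','A','B','A','B','B','A','B','A','B','A','A','A','B','B','A','B','B','A','B','A','B','B','A','B','A','B','A','A','A','B','B','A','B','B','A','B']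
  else if c = 'V' then ['A','B','A','A','A','B','B','A','B','B','A','B','A','B','A','A','A','B','B','A','B','A','A','A','B','B','A','B','A','A','A','B','B','A','B','B','A','B','A','B','B','A','B','A','B','A','A','A','B','B','A','B','B','A','B','A','B','A','A','A','B','B','A','B','A','A','A','B','B','A','B','A','A','A','B','B','A','B','B','A','B','A','B','B','A','B','A','B','A','A','A','B','B','A','B','B','A','B','A','B','B','A','B','A','B','A','A','A','B','B','A','B','B','A','B']
  else if c = 'W' then ['A','B','A','A','A','B','B','A','B','B','A','B','A','B','B','A','B','A','B','A','A','A','B','B','A','B','B','A','B']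
  else if c = 'X' then ['A','B','A','A','A','B','B','A','B','B','A','B','A','B','A','A','A','B','B','A','B','A','A','A','B','B','A','B','A','A','A','B','B','A','B','B','A','B','A','B','B','A','B','A','B','A','A','A','B','B','A','B','B','A','B','A','B','A','A','A','B','B','A','B','A','A','A','B','B','A','B','A','A','A','B','B','A','B','B','A','B','A','B','B','A','B']
  else if c = 'Y' then ['A','B','A','A','A','B','B','A','B','B','A','B','A','B','B','A','B','A','B','A','A','A','B','B','A','B','B','A','B','A','B','A','A','A','B','B','A','B','B','A','B','A','B','B','A','B','A','B','A','A','A','B','B','A','B','B','A','B']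
  else if c = 'Z' then ['A','B','A','A','A','B','B','A','B','B','A','B','A','B','B','A','B','A','B','A','A','A','B','B','A','B','B','A','B','A','B','A','A','A','B','B','A','B','B','A','B','A','B','A','A','A','B','B','A','B','A','A','A','B','B','A','B','A','A','A','B','B','A','B','B','A','B','A','B','B','A','B','A','B','A','A','A','B','B','A','B','B','A','B','A','B','B','A','B','A','B','A','A','A','B','B','A','B','B','A','B','A','B','A','A','A','B','B','A','B','B','A','B','A','B','A','A','A','B','B','A','B','A','A','A','B','B','A','B','A','A','A','B','B','A','B','B','A','B','A','B','B','A','B','A','B','A','A','A','B','B','A','B','B','A','B','A','B','B','A','B','A','B','A','A','A','B','B','A','B','B','A','B']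
  else []

-- "".join(_FULL3[c] for c in arg_str): one pass, left-to-right
def generate_grammary_alt (arg_str : String) : String :=
  String.mk (arg_str.toList.flatMap full3)

-- ===== PRECONDITION & SPEC =====
-- Pre_ excludes exactly the inputs containing a character outside 'A'..'Z', on which
-- Python A (and B) raises KeyError instead of returning.
def Pre_generate_grammary (arg_str : String) : Prop :=
  arg_str.toList.all (fun c => 'A' ≤ c && c ≤ 'Z') = true
instance (arg_str : String) : Decidable (Pre_generate_grammary arg_str) := by
  unfold Pre_generate_grammary; infer_instance
def pvWitness_generate_grammary : String := "HELLO"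

def Spec_generate_grammary (arg_str : String) (out : String) : Prop := out = generate_grammary_alt arg_str
instance (arg_str : String) (out : String) : Decidable (Spec_generate_grammary arg_str out) := by unfold Spec_generate_grammary; infer_instance

-- ===== CLAIM =====
def Claim_equal_generate_grammary : Prop := ∀ (arg_str : String), Dom_generate_grammary arg_str → Pre_generate_grammary arg_str → Spec_generate_grammary arg_str (generate_grammary arg_str)

-- ===== LEMMAS AND PROOFS =====

theorem gramPass_eq_flatMap (s : List Char) : gramPass s = s.flatMap gram := by
  simpa [gramPass] using PySem.List.foldl_append_eq_flatMap gram s []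

theorem flatMap_assoc (f h : Char → List Char) (s : List Char) :
    (s.flatMap f).flatMap h = s.flatMap (fun c => (f c).flatMap h) := by
  induction s with
  | nil => rfl
  | cons a t ih => simp [List.flatMap_cons, ih]

-- each table entry is exactly the depth-3 expansion of its letter (both sides are []
-- / "" for a non-letter, so no hypothesis is needed)
def pvLetters : List Char := ['A','B','C','D','E','F','G','H','I','J','K','L','M','N','O','P','Q','R','S','T','U','V','W','X','Y','Z']

set_option maxRecDepth 200000 in
theorem full3_eq_letters :
    pvLetters.all (fun c => full3 c == ((gram c).flatMap gram).flatMap gram) = true := by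
  decide

theorem full3_eq (c : Char) : full3 c = ((gram c).flatMap gram).flatMap gram := by
  by_cases h : c ∈ pvLetters
  · have hall := List.all_eq_true.mp full3_eq_letters
    exact eq_of_beq (hall c h)
  · simp only [pvLetters, List.mem_cons, List.not_mem_nil, or_false] at h
    push Not at h
    obtain ⟨hA, hB, hC, hD, hE, hF, hG, hH, hI, hJ, hK, hL, hM, hN, hO, hP, hQ, hR, hS, hT, hU, hV, hW, hX, hY, hZ⟩ := h
    simp [full3, gram, hA, hB, hC, hD, hE, hF, hG, hH, hI, hJ, hK, hL, hM, hN, hO, hP, hQ, hR, hS, hT, hU, hV, hW, hX, hY, hZ]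

-- ===== VERDICT =====
theorem generate_grammary_spec : Claim_equal_generate_grammary := by
  intro arg_str _ _
  unfold Spec_generate_grammary generate_grammary generate_grammary_alt
  have h3 : PySem.List.pyRange 0 3 1 = [0, 1, 2] := by decide
  rw [h3]
  simp only [List.foldl, gramPass_eq_flatMap, flatMap_assoc]
  congr 1
  refine (List.flatMap_congr (fun c _ => ?_)).symm
  rw [full3_eq c, flatMap_assoc]
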